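-- pv_equiv track=rewrite | github.com/ooviedoa/AT4Dash | src/app.py | clasificar_grupo
-- ===== SOURCE A (Python) =====
-- map_grupo = {
--     (0, 4): "Mortalidad neonatal",
--     (5, 6): "Mortalidad infantil",
--     (7, 8): "Primera infancia",
--     (9, 10): "Niñez",
--     (11, 11): "Adolescencia",
--     (12, 13): "Juventud",
--     (14, 16): "Adultez temprana",
--     (17, 19): "Adultez intermedia",
--     (20, 24): "Vejez",
--     (25, 28): "Longevidad / Centenarios",
--     (29, 29): "Edad desconocida"
-- }
--
-- def clasificar_grupo(codigo):
--     try: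
--         codigo = int(codigo)
--         for rango, nombre in map_grupo.items():
--             if rango[0] <= codigo <= rango[1]:
--                 return nombre
--         return "No especificado"
--     except:
--         return "No especificado"
-- ===== SOURCE B (Python) =====
-- map_grupo = {
--     (0, 4): "Mortalidad neonatal",
--     (5, 6): "Mortalidad infantil",
--     (7, 8): "Primera infancia",
--     (9, 10): "Niñez",
--     (11, 11): "Adolescencia",
--     (12, 13): "Juventud",
--     (14, 16): "Adultez temprana",
--     (17, 19): "Adultez intermedia",
--     (20, 24): "Vejez",
--     (25, 28): "Longevidad / Centenarios",
--     (29, 29): "Edad desconocida"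
-- }
--
-- # The groups tile 0..29 contiguously, so the group of a code is determined by the
-- # first cutoff (upper bound) that is >= the code: binary search over the cutoffs.
-- _NOMBRES = ["Mortalidad neonatal", "Mortalidad infantil", "Primera infancia",
--             "Niñez", "Adolescencia", "Juventud", "Adultez temprana",
--             "Adultez intermedia", "Vejez", "Longevidad / Centenarios",
--             "Edad desconocida"]
-- _CORTES = [4, 6, 8, 10, 11, 13, 16, 19, 24, 28, 29]
--
-- def clasificar_grupo(codigo):
--     try:
--         c = int(codigo)
--     except:
--         return "No especificado"
--     if c < 0 or c > 29:
--         return "No especificado"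
--     lo, hi = 0, len(_CORTES) - 1
--     while lo < hi:
--         mid = (lo + hi) // 2
--         if c <= _CORTES[mid]:
--             hi = mid
--         else:
--             lo = mid + 1
--     return _NOMBRES[lo]
-- ===== Notes on version B (the rewrite author's own statement) =====
-- stated objective: alternative
-- what changed: Replaces A's linear scan over map_grupo's (lo,hi) ranges with an explicit range check plus a binary search over the sorted list of group upper bounds (the groups tile 0..29 contiguously), indexing into a parallel name list.
import Mathlib
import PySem

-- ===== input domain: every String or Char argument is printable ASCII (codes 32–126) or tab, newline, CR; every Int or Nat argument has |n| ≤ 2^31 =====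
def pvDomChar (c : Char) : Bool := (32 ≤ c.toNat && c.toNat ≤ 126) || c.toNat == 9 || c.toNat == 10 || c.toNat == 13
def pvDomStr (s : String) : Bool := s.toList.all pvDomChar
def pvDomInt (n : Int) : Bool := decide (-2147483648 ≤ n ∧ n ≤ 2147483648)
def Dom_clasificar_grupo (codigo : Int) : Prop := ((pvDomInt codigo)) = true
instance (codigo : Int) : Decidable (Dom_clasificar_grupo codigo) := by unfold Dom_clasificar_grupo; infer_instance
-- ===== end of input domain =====

-- B replaces A's linear scan of (lo,hi) ranges by an explicit 0..29 range check plus a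
-- binary search over the sorted group upper bounds (the ranges tile 0..29); same values.

-- ===== PORT A =====
-- module constant map_grupo (insertion-ordered dict as association list)
def mapGrupo : List ((Int × Int) × String) :=
  [((0, 4), "Mortalidad neonatal"),
   ((5, 6), "Mortalidad infantil"),
   ((7, 8), "Primera infancia"),
   ((9, 10), "Niñez"),
   ((11, 11), "Adolescencia"),
   ((12, 13), "Juventud"),
   ((14, 16), "Adultez temprana"),
   ((17, 19), "Adultez intermedia"),
   ((20, 24), "Vejez"),
   ((25, 28), "Longevidad / Centenarios"),
   ((29, 29), "Edad desconocida")]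

-- the for-loop over map_grupo.items() with early return
def clasificarLoopA (c : Int) : List ((Int × Int) × String) → String
  | [] => "No especificado"
  | (rango, nombre) :: rest =>
      if rango.1 ≤ c ∧ c ≤ rango.2 then nombre else clasificarLoopA c rest

def clasificar_grupo (codigo : Int) : String :=
  clasificarLoopA codigo mapGrupo

-- ===== PORT B =====
def nombresB : List String :=
  ["Mortalidad neonatal", "Mortalidad infantil", "Primera infancia",
   "Niñez", "Adolescencia", "Juventud", "Adultez temprana",
   "Adultez intermedia", "Vejez", "Longevidad / Centenarios",
   "Edad desconocida"]

def cortesB : List Int := [4, 6, 8, 10, 11, 13, 16, 19, 24, 28, 29]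

-- the while lo < hi binary-search loop; indices are always in range (lo ≤ mid < hi ≤ 10),
-- so the getD default is never used — exact w.r.t. Python's _CORTES[mid]
def bsearchB (c : Int) (lo hi : Nat) : Nat :=
  if lo < hi then
    let mid := (lo + hi) / 2
    if c ≤ cortesB.getD mid 0 then bsearchB c lo mid else bsearchB c (mid + 1) hi
  else lo
termination_by hi - lo
decreasing_by all_goals omega

def clasificar_grupo_alt (codigo : Int) : String :=
  if codigo < 0 ∨ codigo > 29 then "No especificado"
  else nombresB.getD (bsearchB codigo 0 (cortesB.length - 1)) "No especificado"

-- ===== PRECONDITION & SPEC =====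
def Spec_clasificar_grupo (codigo : Int) (out : String) : Prop := out = clasificar_grupo_alt codigo
instance (codigo : Int) (out : String) : Decidable (Spec_clasificar_grupo codigo out) := by unfold Spec_clasificar_grupo; infer_instance

-- ===== CLAIM =====
def Claim_equal_clasificar_grupo : Prop := ∀ (codigo : Int), Dom_clasificar_grupo codigo → Spec_clasificar_grupo codigo (clasificar_grupo codigo)

-- ===== LEMMAS AND PROOFS =====
set_option maxHeartbeats 1600000 in
theorem out_of_range_eq (c : Int) (h : ¬ (0 ≤ c ∧ c ≤ 29)) :
    clasificar_grupo c = clasificar_grupo_alt c := by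
  have hA : clasificar_grupo c = "No especificado" := by
    simp only [clasificar_grupo, mapGrupo, clasificarLoopA]
    split_ifs <;> first | rfl | omega
  have hB : clasificar_grupo_alt c = "No especificado" := by
    unfold clasificar_grupo_alt
    rw [if_pos (by omega)]
  rw [hA, hB]

-- ===== VERDICT =====
set_option maxHeartbeats 1600000 in
theorem clasificar_grupo_spec : Claim_equal_clasificar_grupo := by
  intro c _
  unfold Spec_clasificar_grupo
  by_cases h : 0 ≤ c ∧ c ≤ 29
  · obtain ⟨h1, h2⟩ := h
    interval_cases c <;> simp [clasificar_grupo, mapGrupo, clasificarLoopA, clasificar_grupo_alt, bsearchB, cortesB, nombresB]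
  · exact out_of_range_eq c h
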